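-- pv_equiv track=rewrite | github.com/wanawin/archeatype | pages/heatmapper.py | d1_d2_from_history
-- ===== SOURCE A (Python) =====
-- from typing import List, Dict, Optional, Tuple
--
-- DIGITS = list("0123456789")
--
-- def d1_d2_from_history(all_rows: List[List[str]]) -> Tuple[Optional[str], Optional[str]]:
--     """Return the most/second‑most overdue digits (D1, D2) by age since last seen (across all_rows)."""
--     age = {d: None for d in DIGITS}
--     # Walk backwards to find first occurrence age
--     for back, row in enumerate(reversed(all_rows), start=0):
--         s = set(row)
--         for d in DIGITS:
--             if age[d] is None and d in s:
--                 age[d] = back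
--     # None => never seen in provided history; treat as very large age
--     items = [(d, (9999 if age[d] is None else age[d])) for d in DIGITS]
--     items.sort(key=lambda x: (-x[1], x[0]))
--     d1 = items[0][0] if items else None
--     d2 = items[1][0] if len(items) > 1 else None
--     return d1, d2
-- ===== SOURCE B (Python) =====
-- DIGITS = list("0123456789")
--
-- def d1_d2_from_history(all_rows):
--     """Return the most/second-most overdue digits (D1, D2) by age since last seen (across all_rows)."""
--     n = len(all_rows)
--
--     def age_of(d):
--         # search backwards through history for the most recent row containing d
--         for back in range(n):
--             if d in all_rows[n - 1 - back]:
--                 return back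
--         return 9999  # never seen
--
--     # single selection pass: keep the best and second-best (age, digit); no dict, no sort
--     best = None
--     second = None
--     for d in DIGITS:
--         a = age_of(d)
--         if best is None or a > best[0]:
--             best, second = (a, d), best
--         elif second is None or a > second[0]:
--             second = (a, d)
--     return best[1], second[1]
-- ===== Notes on version B (the rewrite author's own statement) =====
-- stated objective: alternative
-- what changed: Removes A's age dict and its sort entirely: B searches backwards per digit for the most recent row containing it (direct indexed scan with early return) and selects the top two (age, digit) pairs in one streaming best/second-best pass, trading A's single reversed walk plus sort for up to 10 independent backward scans with O(1) extra state.
import Mathlib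
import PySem

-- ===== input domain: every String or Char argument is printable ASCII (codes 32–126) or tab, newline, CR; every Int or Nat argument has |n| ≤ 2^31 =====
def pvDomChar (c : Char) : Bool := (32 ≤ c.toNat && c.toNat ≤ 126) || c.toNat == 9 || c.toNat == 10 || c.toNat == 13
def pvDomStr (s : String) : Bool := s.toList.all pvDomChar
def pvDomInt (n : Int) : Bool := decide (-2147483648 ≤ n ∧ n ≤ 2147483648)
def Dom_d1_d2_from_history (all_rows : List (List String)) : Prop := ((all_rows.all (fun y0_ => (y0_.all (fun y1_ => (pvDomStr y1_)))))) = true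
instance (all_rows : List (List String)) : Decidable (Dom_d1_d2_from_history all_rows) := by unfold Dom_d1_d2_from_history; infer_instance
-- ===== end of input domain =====

-- B drops A's age dict and its sort entirely: a direct backward search per digit plus one
-- streaming best/second-best selection pass (alternative algorithm, no dict and no sort), same results.

-- module-level constant DIGITS = list("0123456789"), shared by both programs
def pvDIGITS : List String := ["0","1","2","3","4","5","6","7","8","9"]

-- ===== PORT A =====
-- age = {d: None for d in DIGITS}
-- for back, row in enumerate(reversed(all_rows)):
--   s = set(row)
--   for d in DIGITS: if age[d] is None and d in s: age[d] = back
def pvAgeA (all_rows : List (List String)) : PySem.Dict String (Option Int) :=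
  (PySem.List.enumerate all_rows.reverse 0).foldl
    (fun age br =>
      let s : PySem.Set String := PySem.Set.ofList br.2
      pvDIGITS.foldl
        (fun ag d =>
          if (ag.getD d none == none) && PySem.Set.contains s d then ag.insert d (some br.1) else ag)
        age)
    (pvDIGITS.foldl (fun d k => d.insert k none) PySem.Dict.empty)

-- items = [(d, 9999 if age[d] is None else age[d]) for d in DIGITS]
def pvItemsA (all_rows : List (List String)) : List (String × Int) :=
  pvDIGITS.map (fun d =>
    (d, match (pvAgeA all_rows).getD d none with | none => (9999 : Int) | some v => v))

def d1_d2_from_history (all_rows : List (List String)) : Option String × Option String :=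
  -- items.sort(key=lambda x: (-x[1], x[0]))
  let itemsS := PySem.List.sorted2 (pvItemsA all_rows) (fun x => -x.2) (fun x => x.1) false
  -- d1 = items[0][0] if items else None; d2 = items[1][0] if len(items) > 1 else None
  ((PySem.List.pyGet? itemsS 0).map (·.1), (PySem.List.pyGet? itemsS 1).map (·.1))

-- ===== PORT B =====
-- def age_of(d): for back in range(n): if d in all_rows[n-1-back]: return back; return 9999
-- (the early 'return back' is the structural recursion over the range list; the index
--  n-1-back is always in range, so the IndexError case of pyGet? — guarded by getD [] — never fires)
def pvAgeGo (all_rows : List (List String)) (n : Int) (d : String) : List Int → Int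
  | [] => 9999
  | back :: rest =>
      if ((PySem.List.pyGet? all_rows (n - 1 - back)).getD []).contains d then back
      else pvAgeGo all_rows n d rest

def pvAgeOf (all_rows : List (List String)) (d : String) : Int :=
  pvAgeGo all_rows all_rows.length d (PySem.List.pyRange 0 all_rows.length 1)

-- best = second = None
-- for d in DIGITS: a = age_of(d); if best is None or a > best[0]: best, second = (a,d), best
--                  elif second is None or a > second[0]: second = (a,d)
-- return best[1], second[1]   (DIGITS has 10 elements, so best/second are always set; .map keeps the port total)
def d1_d2_from_history_alt (all_rows : List (List String)) : Option String × Option String :=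
  let res := pvDIGITS.foldl
    (fun (bs : Option (Int × String) × Option (Int × String)) d =>
      let a := pvAgeOf all_rows d
      if (match bs.1 with | none => true | some b => decide (b.1 < a)) then (some (a, d), bs.1)
      else if (match bs.2 with | none => true | some s => decide (s.1 < a)) then (bs.1, some (a, d))
      else bs)
    (none, none)
  (res.1.map (·.2), res.2.map (·.2))

-- ===== PRECONDITION & SPEC =====
def Spec_d1_d2_from_history (all_rows : List (List String)) (out : Option String × Option String) : Prop := out = d1_d2_from_history_alt all_rows
instance (all_rows : List (List String)) (out : Option String × Option String) : Decidable (Spec_d1_d2_from_history all_rows out) := by unfold Spec_d1_d2_from_history; infer_instance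

-- ===== CLAIM (what is proved, stated in full; the proofs are below) =====
def Claim_equal_d1_d2_from_history : Prop := ∀ (all_rows : List (List String)), Dom_d1_d2_from_history all_rows → Spec_d1_d2_from_history all_rows (d1_d2_from_history all_rows)

-- ===== LEMMAS AND PROOFS =====

-- the insertion order A's sort uses on (digit, age) pairs, and the (age, digit) flip B's state carries
def pvBefore (x y : String × Int) : Bool :=
  decide (-x.2 < -y.2) || (!decide (-y.2 < -x.2) && decide (x.1 < y.1))

def pvFlip (p : String × Int) : Int × String := (p.2, p.1)

-- A's inner loop over DIGITS, seen from one key d0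
lemma pv_a_inner (l s : List String) (b : Int) (d0 : String) (ag : PySem.Dict String (Option Int)) :
    (l.foldl (fun ag d => if (ag.getD d none == none) && PySem.Set.contains s d then ag.insert d (some b) else ag) ag).getD d0 none
      = if l.contains d0 && (ag.getD d0 none == none) && PySem.Set.contains s d0 then some b else ag.getD d0 none := by
  induction l generalizing ag with
  | nil => simp
  | cons a l ih =>
    simp only [List.foldl_cons]
    rw [ih]
    by_cases ha : a = d0
    · subst ha
      by_cases hn : ag.getD a none = none
      · by_cases hs : a ∈ s
        · simp [hn, hs, PySem.Dict.getD_insert_self]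
        · simp [hn, hs]
      · simp [hn]
    · have h1 : ∀ v, ((if (ag.getD a none == none) && PySem.Set.contains s a then ag.insert a v else ag)).getD d0 none = ag.getD d0 none := by
        intro v; split_ifs with h
        · rw [PySem.Dict.getD_insert]; simp [Ne.symm ha]
        · rfl
      rw [h1]
      simp [Ne.symm ha]

-- once a digit's age is set, A's outer loop keeps it
lemma pv_a_keep (l : List (List String)) (k v : Int) (d0 : String) (ag : PySem.Dict String (Option Int))
    (h : ag.getD d0 none = some v) :
    ((PySem.List.enumerate l k).foldl
        (fun age br =>
          let s : PySem.Set String := PySem.Set.ofList br.2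
          pvDIGITS.foldl
            (fun ag d => if (ag.getD d none == none) && PySem.Set.contains s d then ag.insert d (some br.1) else ag)
            age)
        ag).getD d0 none = some v := by
  induction l generalizing k ag with
  | nil => simpa using h
  | cons r l ih =>
    rw [PySem.List.enumerate_cons, List.foldl_cons]
    exact ih (k+1) _ (by rw [pv_a_inner]; simp [h])

-- A's outer loop: from an unset state, the age of d0 is the first index (offset k) of a row containing d0
lemma pv_a_outer (l : List (List String)) (k : Int) (d0 : String) (ag : PySem.Dict String (Option Int))
    (hd0 : pvDIGITS.contains d0 = true) (h : ag.getD d0 none = none) :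
    ((PySem.List.enumerate l k).foldl
        (fun age br =>
          let s : PySem.Set String := PySem.Set.ofList br.2
          pvDIGITS.foldl
            (fun ag d => if (ag.getD d none == none) && PySem.Set.contains s d then ag.insert d (some br.1) else ag)
            age)
        ag).getD d0 none
      = (l.findIdx? (fun row => row.contains d0)).map (fun j => k + (j : Int)) := by
  induction l generalizing k ag with
  | nil => simpa using h
  | cons r l ih =>
    rw [PySem.List.enumerate_cons, List.foldl_cons, List.findIdx?_cons]
    by_cases hr : r.contains d0 = true
    · have hthis : (pvDIGITS.foldl
            (fun ag d => if (ag.getD d none == none) && PySem.Set.contains (PySem.Set.ofList r) d then ag.insert d (some k) else ag)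
            ag).getD d0 none = some k := by
        rw [pv_a_inner]; simp [h]; exact ⟨by simpa using hd0, by simpa using hr⟩
      simp only [hr, if_pos]
      rw [pv_a_keep _ _ _ _ _ hthis]
      simp
    · have hkeep : (pvDIGITS.foldl
            (fun ag d => if (ag.getD d none == none) && PySem.Set.contains (PySem.Set.ofList r) d then ag.insert d (some k) else ag)
            ag).getD d0 none = none := by
        rw [pv_a_inner]; simp [h]; intro _; simpa using hr
      rw [ih (k+1) _ hkeep]
      simp only [hr, if_neg, Bool.false_eq_true, not_false_iff]
      cases l.findIdx? (fun row => row.contains d0) with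
      | none => simp
      | some j => simp; ring

-- the initialisation {d: None for d in DIGITS} reads back as none at every key
lemma pv_a_init (l : List String) (d0 : String) (ag : PySem.Dict String (Option Int))
    (h : ag.getD d0 none = none) :
    (l.foldl (fun d k => d.insert k none) ag).getD d0 none = none := by
  induction l generalizing ag with
  | nil => simpa using h
  | cons a l ih =>
    rw [List.foldl_cons]
    apply ih
    rw [PySem.Dict.getD_insert]
    split_ifs <;> simp [h]

-- B's range loop with early return: first index back (from k on) whose row (counted from the end) contains d
lemma pv_b_go (all_rows : List (List String)) (d : String) (m : Nat) :
    ∀ (k : Nat), k + m = all_rows.length →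
    pvAgeGo all_rows all_rows.length d (PySem.List.pyRange (k : Int) (all_rows.length : Int) 1)
      = match ((all_rows.reverse.drop k).findIdx? (fun row => row.contains d)) with
        | none => 9999
        | some j => ((k + j : Nat) : Int) := by
  induction m with
  | zero =>
    intro k hk
    rw [PySem.List.pyRange_one_eq_nil (by omega)]
    rw [List.drop_of_length_le (by simp; omega)]
    simp [pvAgeGo]
  | succ m ih =>
    intro k hk
    have hklt : k < all_rows.length := by omega
    rw [PySem.List.pyRange_one_cons (by exact_mod_cast hklt)]
    have hrev : k < all_rows.reverse.length := by simpa using hklt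
    rw [List.drop_eq_getElem_cons hrev, List.findIdx?_cons]
    have hidx : ((all_rows.length : Int) - 1 - (k : Int)) = ((all_rows.length - 1 - k : Nat) : Int) := by omega
    have hget : PySem.List.pyGet? all_rows ((all_rows.length : Int) - 1 - (k : Int))
        = some (all_rows.reverse[k]'hrev) := by
      rw [hidx, PySem.List.pyGet?_natCast]
      rw [List.getElem?_eq_getElem (by omega)]
      congr 1
      rw [List.getElem_reverse]
    show (if ((PySem.List.pyGet? all_rows ((all_rows.length : Int) - 1 - (k:Int))).getD []).contains d then (k:Int)
          else pvAgeGo all_rows all_rows.length d (PySem.List.pyRange ((k:Int)+1) (all_rows.length : Int) 1)) = _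
    rw [hget]
    simp only [Option.getD_some, List.getElem_reverse]
    by_cases hc : d ∈ all_rows[all_rows.length - 1 - k]'(by omega)
    · simp [hc]
    · have hcast : ((k : Int) + 1) = ((k + 1 : Nat) : Int) := by push_cast; ring
      rw [hcast, ih (k+1) (by omega)]
      cases (all_rows.reverse.drop (k+1)).findIdx? (fun row => row.contains d) with
      | none => simp [hc]
      | some j => simp [hc]; ring

-- the two age computations agree on every digit key
lemma pv_age_eq (all_rows : List (List String)) (d : String) (hd : d ∈ pvDIGITS) :
    (match (pvAgeA all_rows).getD d none with | none => (9999 : Int) | some v => v)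
      = pvAgeOf all_rows d := by
  have hA : (pvAgeA all_rows).getD d none
      = (all_rows.reverse.findIdx? (fun row => row.contains d)).map (fun j => (0:Int) + (j:Int)) := by
    unfold pvAgeA
    exact pv_a_outer _ _ _ _ (by simpa using hd) (pv_a_init _ _ _ (by simp))
  have hB : pvAgeOf all_rows d
      = match (all_rows.reverse.findIdx? (fun row => row.contains d)) with
        | none => 9999
        | some j => ((j : Nat) : Int) := by
    unfold pvAgeOf
    have := pv_b_go all_rows d all_rows.length 0 (by omega)
    simpa using this
  rw [hA, hB]
  cases all_rows.reverse.findIdx? (fun row => row.contains d) <;> simp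

lemma pv_digits_lt : List.Pairwise (· < ·) pvDIGITS := by
  have hp : List.Pairwise (fun s t : String => s.toList < t.toList) pvDIGITS := by decide
  exact hp.imp (fun h => String.lt_iff_toList_lt.mpr h)

-- on a pair whose digit is below d, A's insertion order is exactly "strictly older"
lemma pv_before_eq (d : String) (a : Int) (y : String × Int) (h : y.1 < d) :
    pvBefore (d, a) y = decide (y.2 < a) := by
  simp [pvBefore, lt_asymm h]

-- one selection step = the first two entries of one insertion-sort step (new digit above all stored ones)
lemma pv_step (d : String) (a : Int) (acc : List (String × Int))
    (h0 : ∀ p ∈ acc, p.1 < d) :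
    (if (match acc[0]?.map pvFlip with | none => true | some b => decide (b.1 < a)) then (some (a, d), acc[0]?.map pvFlip)
     else if (match acc[1]?.map pvFlip with | none => true | some s => decide (s.1 < a)) then (acc[0]?.map pvFlip, some (a, d))
     else (acc[0]?.map pvFlip, acc[1]?.map pvFlip))
    = ((PySem.List.insertBy pvBefore (d, a) acc)[0]?.map pvFlip,
       (PySem.List.insertBy pvBefore (d, a) acc)[1]?.map pvFlip) := by
  match acc with
  | [] => simp [PySem.List.insertBy, pvFlip]
  | [y] =>
    have hb : pvBefore (d, a) y = decide (y.2 < a) := pv_before_eq d a y (h0 y (by simp))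
    by_cases hya : y.2 < a
    · simp [PySem.List.insertBy, hb, hya, pvFlip]
    · simp [PySem.List.insertBy, hb, hya, pvFlip]
  | y :: z :: t =>
    have hby : pvBefore (d, a) y = decide (y.2 < a) := pv_before_eq d a y (h0 y (by simp))
    have hbz : pvBefore (d, a) z = decide (z.2 < a) := pv_before_eq d a z (h0 z (by simp))
    by_cases hya : y.2 < a
    · simp [PySem.List.insertBy, hby, hya, pvFlip]
    · by_cases hza : z.2 < a
      · simp [PySem.List.insertBy, hby, hbz, hya, hza, pvFlip]
      · simp [PySem.List.insertBy, hby, hbz, hya, hza, pvFlip]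

-- B's whole selection loop = the first two entries of A's whole insertion sort
lemma pv_stream_eq (f : String → Int) :
    ∀ (l : List String) (acc : List (String × Int)),
      l.Pairwise (· < ·) →
      (∀ p ∈ acc, ∀ d ∈ l, p.1 < d) →
      l.foldl (fun bs d =>
          let a := f d
          if (match bs.1 with | none => true | some b => decide (b.1 < a)) then (some (a, d), bs.1)
          else if (match bs.2 with | none => true | some s => decide (s.1 < a)) then (bs.1, some (a, d))
          else bs)
        (acc[0]?.map pvFlip, acc[1]?.map pvFlip)
      = ((l.foldl (fun ac d => PySem.List.insertBy pvBefore (d, f d) ac) acc)[0]?.map pvFlip,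
         (l.foldl (fun ac d => PySem.List.insertBy pvBefore (d, f d) ac) acc)[1]?.map pvFlip) := by
  intro l
  induction l with
  | nil => intro acc _ _; rfl
  | cons d l ih =>
    intro acc hp hacc
    rw [List.foldl_cons, List.foldl_cons]
    have hstep := pv_step d (f d) acc (fun p hp' => hacc p hp' d (by simp))
    have h2 := ih (PySem.List.insertBy pvBefore (d, f d) acc) hp.tail
      (fun p hmem d' hd' => by
        rcases (PySem.List.mem_insertBy pvBefore (d, f d) p acc).mp hmem with h | h
        · subst h; exact (List.pairwise_cons.mp hp).1 d' hd'
        · exact hacc p h d' (by simp [hd']))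
    rw [← hstep] at h2
    exact h2

-- pyGet? at the literal indices 0 and 1 is getElem?
lemma pv_pyGet?_zero {α : Type} (xs : List α) : PySem.List.pyGet? xs 0 = xs[0]? := by
  cases xs <;> simp [PySem.List.pyGet?, PySem.List.pyIdx?]

lemma pv_pyGet?_one {α : Type} (xs : List α) : PySem.List.pyGet? xs 1 = xs[1]? := by
  cases xs with
  | nil => simp [PySem.List.pyGet?, PySem.List.pyIdx?]
  | cons x t => cases t <;> simp [PySem.List.pyGet?, PySem.List.pyIdx?]

-- ===== VERDICT (by name: the statement is the Claim_ definition above) =====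
theorem d1_d2_from_history_spec : Claim_equal_d1_d2_from_history := by
  intro all_rows _
  show _ = _
  have hitems : pvItemsA all_rows = pvDIGITS.map (fun d => (d, pvAgeOf all_rows d)) := by
    unfold pvItemsA
    exact List.map_congr_left (fun d hd => by rw [pv_age_eq all_rows d hd])
  have hsort : PySem.List.sorted2 (pvItemsA all_rows) (fun x => -x.2) (fun x => x.1) false
      = pvDIGITS.foldl (fun ac d => PySem.List.insertBy pvBefore (d, pvAgeOf all_rows d) ac) [] := by
    rw [hitems]
    simp only [PySem.List.sorted2, if_neg (by decide : ¬ (false = true)), List.foldl_map]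
    rfl
  have hmain := pv_stream_eq (fun d => pvAgeOf all_rows d) pvDIGITS []
    pv_digits_lt (by intro p hp; simp at hp)
  simp only [List.getElem?_nil, Option.map_none] at hmain
  simp only [d1_d2_from_history, d1_d2_from_history_alt, hsort, hmain,
    pv_pyGet?_zero, pv_pyGet?_one]
  cases h0 : (pvDIGITS.foldl (fun ac d => PySem.List.insertBy pvBefore (d, pvAgeOf all_rows d) ac) [])[0]? <;>
  cases h1 : (pvDIGITS.foldl (fun ac d => PySem.List.insertBy pvBefore (d, pvAgeOf all_rows d) ac) [])[1]? <;>
    simp [pvFlip]
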